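-- pv_equiv track=rewrite | github.com/BD2KOnFHIR/CancerTrialByFHIR | code/data-processing/NLP/NLP_Functions.py | multiple_lookup
-- ===== SOURCE A (Python) =====
-- def multiple_lookup(text, lookup_terms: dict, not_found_result=None) -> str:
--     text = text.lower()
--     matched = []
--
--     for term, result in lookup_terms.items():
--         if term.lower() in text:
--             matched += [result]
--
--     if not matched:
--         return not_found_result
--
--     return '/'.join(matched)
-- ===== SOURCE B (Python) =====
-- def multiple_lookup(text, lookup_terms: dict, not_found_result=None) -> str:
--     # Substring hash-index: for each distinct term length L, build (once) the set
--     # of all length-L substrings of the lowered text; each term's substring test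
--     # then becomes a set lookup instead of a scan over the text.
--     low = text.lower()
--     subs = {}  # length -> set of all substrings of low with that length
--     matched = []
--     for term, result in lookup_terms.items():
--         t = term.lower()
--         L = len(t)
--         if L not in subs:
--             subs[L] = {low[i:i + L] for i in range(len(low) - L + 1)}
--         if t in subs[L]:
--             matched.append(result)
--     if not matched:
--         return not_found_result
--     return '/'.join(matched)
-- ===== Notes on version B (the rewrite author's own statement) =====
-- stated objective: faster
-- what changed: B replaces A's per-term substring scan of the text with a hash-index: for each distinct term length it builds once the set of all substrings of the lowered text of that length, so every term's test becomes an O(|term|) set lookup and the text is scanned once per distinct length instead of once per term.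
import Mathlib
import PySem

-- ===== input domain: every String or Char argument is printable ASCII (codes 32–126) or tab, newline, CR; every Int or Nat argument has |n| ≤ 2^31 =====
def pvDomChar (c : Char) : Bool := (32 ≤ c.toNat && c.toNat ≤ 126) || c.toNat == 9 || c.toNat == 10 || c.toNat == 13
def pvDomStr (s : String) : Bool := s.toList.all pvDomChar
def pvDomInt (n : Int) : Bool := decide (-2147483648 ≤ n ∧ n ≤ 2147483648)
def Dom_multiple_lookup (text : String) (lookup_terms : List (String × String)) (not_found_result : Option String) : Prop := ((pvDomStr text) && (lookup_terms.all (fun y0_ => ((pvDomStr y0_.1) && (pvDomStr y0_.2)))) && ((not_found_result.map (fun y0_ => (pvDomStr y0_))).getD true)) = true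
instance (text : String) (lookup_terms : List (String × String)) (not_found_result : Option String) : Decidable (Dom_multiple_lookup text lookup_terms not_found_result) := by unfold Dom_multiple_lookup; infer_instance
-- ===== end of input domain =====

-- B replaces A's per-term scan of the text by a substring hash-index: for each distinct term
-- length it builds (once) the set of all substrings of the lowered text of that length, so each
-- term's test is a set lookup instead of a scan of the text (objective: faster, measured by the check).

-- ===== PORT A =====
def multiple_lookup (text : String) (lookup_terms : List (String × String)) (not_found_result : Option String) : Option String :=
  let text := PySem.Str.lower text
  let matched := lookup_terms.foldl
    (fun matched p =>
      if PySem.Str.isIn (PySem.Str.lower p.1) text then matched ++ [p.2] else matched) []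
  if matched = [] then not_found_result
  else some (PySem.Str.join "/" matched)

-- ===== PORT B =====
-- the set comprehension {low[i:i+L] for i in range(len(low)-L+1)}
def pvSubstrSet (low : String) (L : Int) : PySem.Set String :=
  PySem.Set.ofList ((PySem.List.pyRange 0 (PySem.Str.len low - L + 1) 1).map
    (fun i => PySem.Str.slice low (some i) (some (i + L))))

-- the loop body: cache the substring set for this term's length, then test by set lookup
-- ('subs[L]' is read with getD Set.empty: the branch above has just ensured the key is present)
def pvStepB (low : String) (st : PySem.Dict Int (PySem.Set String) × List String)
    (p : String × String) : PySem.Dict Int (PySem.Set String) × List String :=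
  let t := PySem.Str.lower p.1
  let L : Int := PySem.Str.len t
  let subs := if st.1.contains L then st.1 else st.1.insert L (pvSubstrSet low L)
  if PySem.Set.contains (subs.getD L PySem.Set.empty) t then (subs, st.2 ++ [p.2])
  else (subs, st.2)

def multiple_lookup_alt (text : String) (lookup_terms : List (String × String)) (not_found_result : Option String) : Option String :=
  let low := PySem.Str.lower text
  let res := lookup_terms.foldl (pvStepB low) (PySem.Dict.empty, [])
  if res.2 = [] then not_found_result
  else some (PySem.Str.join "/" res.2)

-- ===== PRECONDITION & SPEC =====
def Spec_multiple_lookup (text : String) (lookup_terms : List (String × String)) (not_found_result : Option String) (out : Option String) : Prop := out = multiple_lookup_alt text lookup_terms not_found_result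
instance (text : String) (lookup_terms : List (String × String)) (not_found_result : Option String) (out : Option String) : Decidable (Spec_multiple_lookup text lookup_terms not_found_result out) := by unfold Spec_multiple_lookup; infer_instance

-- ===== CLAIM (what is proved, stated in full; the proofs are below) =====
def Claim_equal_multiple_lookup : Prop := ∀ (text : String) (lookup_terms : List (String × String)) (not_found_result : Option String), Dom_multiple_lookup text lookup_terms not_found_result → Spec_multiple_lookup text lookup_terms not_found_result (multiple_lookup text lookup_terms not_found_result)

-- ===== LEMMAS AND PROOFS =====

-- membership in the length-|t| substring set is exactly the substring test 't in low'
theorem pv_mem_substrSet_iff (low t : String) :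
    t ∈ pvSubstrSet low (PySem.Str.len t) ↔ PySem.Str.isIn t low = true := by
  rw [pvSubstrSet, PySem.Set.mem_ofList, List.mem_map, PySem.Str.isIn_eq,
    ← PySem.Chars.exists_prefix_drop_iff_isIn]
  constructor
  · rintro ⟨i, hi, hsl⟩
    rw [PySem.List.mem_pyRange_one] at hi
    lift i to ℕ using hi.1 with j
    refine ⟨j, ?_⟩
    rw [List.prefix_iff_eq_take]
    have hthis := congrArg String.toList hsl
    rw [PySem.Str.toList_slice] at hthis
    simp only [PySem.Str.len] at hthis
    rw [PySem.Chars.slice_eq_listSlice, PySem.List.slice_natCast_add] at hthis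
    exact hthis.symm
  · rintro ⟨j, hp⟩
    have hj : t.toList <+: low.toList.drop (min j low.toList.length) := by
      rcases Nat.lt_or_ge low.toList.length j with h | h
      · have hnil : low.toList.drop j = [] := List.drop_eq_nil_of_le (by omega)
        rw [hnil] at hp
        simp [List.prefix_nil.mp hp]
      · rw [min_eq_left h]; exact hp
    have hle : t.toList.length ≤ low.toList.length - min j low.toList.length := by
      have := hj.length_le
      simpa using this
    refine ⟨(min j low.toList.length : ℕ), ?_, ?_⟩
    · rw [PySem.List.mem_pyRange_one]
      have hjm : min j low.toList.length ≤ low.toList.length := min_le_right _ _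
      simp only [PySem.Str.len]
      constructor
      · exact_mod_cast Nat.zero_le _
      · push_cast; omega
    · apply String.toList_inj.mp
      rw [PySem.Str.toList_slice]
      simp only [PySem.Str.len]
      rw [PySem.Chars.slice_eq_listSlice, PySem.List.slice_natCast_add]
      exact (List.prefix_iff_eq_take.mp hj).symm

-- B's fold, started from any dict caching only correct substring sets, computes A's matched list
theorem pv_foldB (low : String) (l : List (String × String))
    (d : PySem.Dict Int (PySem.Set String)) (acc : List String)
    (hd : ∀ L v, d.get? L = some v → v = pvSubstrSet low L) :
    (l.foldl (pvStepB low) (d, acc)).2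
    = l.foldl
      (fun matched p =>
        if PySem.Str.isIn (PySem.Str.lower p.1) low then matched ++ [p.2] else matched) acc := by
  induction l generalizing d acc with
  | nil => rfl
  | cons p rest ih =>
    simp only [List.foldl_cons]
    set t := PySem.Str.lower p.1 with ht
    set L : Int := PySem.Str.len t with hL
    set subs := if d.contains L then d else d.insert L (pvSubstrSet low L) with hsubs
    have hsubs_inv : ∀ L' v, subs.get? L' = some v → v = pvSubstrSet low L' := by
      intro L' v hv
      rw [hsubs] at hv
      split at hv
      · exact hd L' v hv
      · by_cases hne : L' = L
        · subst hne; rw [PySem.Dict.get?_insert_self] at hv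
          exact (Option.some_inj.mp hv).symm
        · rw [PySem.Dict.get?_insert_of_ne _ _ hne] at hv; exact hd L' v hv
    have hget : subs.getD L PySem.Set.empty = pvSubstrSet low L := by
      rw [hsubs]; split
      · next hc =>
        rcases hg : d.get? L with _ | v
        · rw [PySem.Dict.get?_eq_none_iff_contains] at hg; simp [hc] at hg
        · have := hd L v hg; simp [PySem.Dict.getD, hg, this]
      · exact PySem.Dict.getD_insert_self _ _ _ _
    have htest : PySem.Set.contains (subs.getD L PySem.Set.empty) t = PySem.Str.isIn t low := by
      rw [hget, hL]
      rcases h : PySem.Str.isIn t low with _ | _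
      · rw [Bool.eq_false_iff]; intro hc
        exact absurd ((pv_mem_substrSet_iff low t).mp ((PySem.Set.contains_iff _ _).mp hc))
          (by simpa using h)
      · exact (PySem.Set.contains_iff _ _).mpr ((pv_mem_substrSet_iff low t).mpr h)
    have hstep : pvStepB low (d, acc) p
        = (subs, if PySem.Str.isIn t low = true then acc ++ [p.2] else acc) := by
      simp only [pvStepB, ← ht, ← hL, ← hsubs, htest]
      split <;> rfl
    rw [hstep]
    by_cases hc : PySem.Str.isIn t low = true
    · rw [if_pos hc]; exact ih subs (acc ++ [p.2]) hsubs_inv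
    · rw [if_neg hc]; exact ih subs acc hsubs_inv
-- ===== VERDICT (by name: the statement is the Claim_ definition above) =====
theorem multiple_lookup_spec : Claim_equal_multiple_lookup := by
  intro text lookup_terms not_found_result _
  unfold Spec_multiple_lookup multiple_lookup multiple_lookup_alt
  simp only []
  rw [pv_foldB (PySem.Str.lower text) lookup_terms PySem.Dict.empty []
    (by intro L v h; simp [PySem.Dict.empty, PySem.Dict.get?] at h)]
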